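-- pv_equiv track=rewrite | github.com/PikaBlue107/gaberbocchus | scripts/translate_dialogue.py | parse_multiple
-- ===== SOURCE A (Python) =====
-- from typing import Dict, Tuple, List
--
-- def parse_multiple(input_lines: List[str]) -> Tuple[str, List[List[str]]]:
--   """Parses multiple interactions into a list of interactions"""
--
--   # Setup output_interactions to hold our data
--   output_interactions: List[List[str]] = []
--   # whether or not we've finished skipping the header
--   header_seen = False
--   active_interaction: List[str] = None
--   header_text = None
--
--   # Loop across input lines
--   for line in input_lines:
--     # if we're still looking at the header
--     if not header_seen:
--       # if the current line doesn't have stuff, then that's the end of the header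
--       if not line:
--         header_seen = True
--       elif header_text == None:
--
--         header_text = line.strip()
--       # skip this line
--       continue
--
--     # if there's no active interaction and there is some text, start an interaction
--     if active_interaction is None and line:
--       active_interaction = []
--       output_interactions.append(active_interaction)
--
--     # if there is an active interaction, append any text seen
--     if active_interaction is not None:
--       active_interaction.append(line)
--       # if this line is "(End)", then end the interaction
--       if line == "(End)":
--         active_interaction = None
--   # end for line in input_lines
--
--   return (header_text, output_interactions)
-- ===== SOURCE B (Python) =====
-- from typing import List, Tuple
--
-- def _groups(body: List[str]) -> List[List[str]]:
--   """Split body into interaction groups: drop leading empty lines, take one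
--   segment through the first '(End)' inclusive (or to the end), recurse."""
--   i = 0
--   while i < len(body) and not body[i]:
--     i += 1
--   rest = body[i:]
--   if not rest:
--     return []
--   try:
--     k = rest.index("(End)") + 1
--   except ValueError:
--     k = len(rest)
--   return [rest[:k]] + _groups(rest[k:])
--
-- def parse_multiple(input_lines: List[str]) -> Tuple[str, List[List[str]]]:
--   """Parses multiple interactions into a list of interactions"""
--   try:
--     boundary = input_lines.index("")
--   except ValueError:
--     boundary = len(input_lines)
--   header_text = None
--   for line in input_lines[:boundary]:
--     if line:
--       header_text = line.strip()
--       break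
--   return (header_text, _groups(input_lines[boundary + 1:]))
-- ===== Notes on version B (the rewrite author's own statement) =====
-- stated objective: simpler
-- what changed: Replaces A's single-pass three-flag state machine with a two-phase decomposition: locate the header boundary with list.index(''), read the header as the first non-empty line before it, then build groups by recursively segmenting the body at the first '(End)' after dropping leading empty lines.
import Mathlib
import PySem

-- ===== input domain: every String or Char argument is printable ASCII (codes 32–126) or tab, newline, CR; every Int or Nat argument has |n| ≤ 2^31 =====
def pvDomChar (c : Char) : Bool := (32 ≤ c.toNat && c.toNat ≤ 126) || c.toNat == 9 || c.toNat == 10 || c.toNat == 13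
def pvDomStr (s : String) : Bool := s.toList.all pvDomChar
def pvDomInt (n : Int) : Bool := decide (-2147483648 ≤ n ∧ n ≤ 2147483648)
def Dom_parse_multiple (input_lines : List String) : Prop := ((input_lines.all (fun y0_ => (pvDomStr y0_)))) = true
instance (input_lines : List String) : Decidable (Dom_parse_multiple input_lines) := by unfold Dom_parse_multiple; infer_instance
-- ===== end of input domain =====

-- B replaces A's one-pass three-flag state machine by a different decomposition: find the
-- header boundary with list.index(''), then split the body into groups by recursive
-- segmentation at the first '(End)' after dropping leading empty lines (objective: simpler).

-- ===== PORT A =====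
-- state = (header_seen, header_text, output_interactions, active_interaction)
def pmA_step (st : Bool × Option String × List (List String) × Option (List String))
    (line : String) : Bool × Option String × List (List String) × Option (List String) :=
  match st with
  | (header_seen, header_text, out, active) =>
    if header_seen = false then
      if line = "" then (true, header_text, out, active)
      else if header_text = none then (false, some (PySem.Str.strip line), out, active)
      else st
    else
      let active' := if active = none ∧ line ≠ "" then some ([] : List String) else active
      match active' with
      | some g =>
        if line = "(End)" then (header_seen, header_text, out ++ [g ++ [line]], none)
        else (header_seen, header_text, out, some (g ++ [line]))
      | none => (header_seen, header_text, out, none)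

def parse_multiple (input_lines : List String) : Option String × List (List String) :=
  let st := input_lines.foldl pmA_step (false, none, ([], none))
  -- Python's output list aliases the active group: it already contains the unfinished group
  (st.2.1, st.2.2.1 ++ (match st.2.2.2 with | some g => [g] | none => []))

-- ===== PORT B =====
-- _groups: drop leading empty lines, take one segment through the first '(End)' inclusive
-- (or to the end), recurse on the remainder.
def pmB_groups (body : List String) : List (List String) :=
  match hr : body.dropWhile (· = "") with
  | [] => []
  | x :: xs =>
    match PySem.List.index? (x :: xs) "(End)" with
    | some i => (x :: xs).take (i + 1) :: pmB_groups ((x :: xs).drop (i + 1))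
    | none => (x :: xs).take (x :: xs).length :: pmB_groups ((x :: xs).drop (x :: xs).length)
termination_by body.length
decreasing_by
  all_goals
    have h1 : (x :: xs).length ≤ body.length := by
      rw [← hr]; exact List.length_dropWhile_le _ _
  · rw [List.length_drop]
    have h3 : 0 < (x :: xs).length := by simp
    omega
  · rw [List.length_drop]
    have h3 : 0 < (x :: xs).length := by simp
    omega

def parse_multiple_alt (input_lines : List String) : Option String × List (List String) :=
  let boundary : Nat := match PySem.List.index? input_lines "" with
                        | some i => i
                        | none => input_lines.length
  let header_text : Option String :=
    match (input_lines.take boundary).find? (fun l => l != "") with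
    | some l => some (PySem.Str.strip l)
    | none => none
  (header_text, pmB_groups (input_lines.drop (boundary + 1)))

-- ===== PRECONDITION & SPEC =====
def Spec_parse_multiple (input_lines : List String) (out : Option String × List (List String)) : Prop := out = parse_multiple_alt input_lines
instance (input_lines : List String) (out : Option String × List (List String)) : Decidable (Spec_parse_multiple input_lines out) := by unfold Spec_parse_multiple; infer_instance

-- ===== CLAIM (what is proved, stated in full; the proofs are below) =====
def Claim_equal_parse_multiple : Prop := ∀ (input_lines : List String), Dom_parse_multiple input_lines → Spec_parse_multiple input_lines (parse_multiple input_lines)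

-- ===== LEMMAS AND PROOFS =====

theorem pmB_groups_eq (body : List String) : pmB_groups body =
    match body.dropWhile (· = "") with
    | [] => []
    | x :: xs =>
      match PySem.List.index? (x :: xs) "(End)" with
      | some i => (x :: xs).take (i + 1) :: pmB_groups ((x :: xs).drop (i + 1))
      | none => (x :: xs).take (x :: xs).length :: pmB_groups ((x :: xs).drop (x :: xs).length) := by
  rw [pmB_groups.eq_def]
  split <;> rename_i h <;> rw [h]

theorem pmB_groups_nil : pmB_groups [] = [] := by
  rw [pmB_groups_eq]; rfl

-- header_text produced by A's header phase, starting from a pending option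
def pmHdr (ht : Option String) (pre : List String) : Option String :=
  match ht with
  | some h => some h
  | none =>
    match pre.find? (fun l => l != "") with
    | some l => some (PySem.Str.strip l)
    | none => none

theorem pmHdr_nil (ht : Option String) : pmHdr ht [] = ht := by
  cases ht <;> simp [pmHdr]

theorem pmHdr_cons (ht : Option String) (x : String) (hx : x ≠ "") (pre : List String) :
    pmHdr (if ht = none then some (PySem.Str.strip x) else ht) pre = pmHdr ht (x :: pre) := by
  cases ht <;> simp [pmHdr, hx]

-- A's header phase: fold until the first "" (if any), accumulating the header text
theorem pmA_head (xs : List String) (ht : Option String) :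
    xs.foldl pmA_step (false, ht, [], none) =
      match PySem.List.index? xs "" with
      | some i => (xs.drop (i + 1)).foldl pmA_step (true, pmHdr ht (xs.take i), [], none)
      | none => (false, pmHdr ht xs, [], none) := by
  induction xs generalizing ht with
  | nil => simp [PySem.List.index?, pmHdr_nil]
  | cons x xs ih =>
    by_cases hx : x = ""
    · subst hx
      rw [PySem.List.index?_cons_self]
      simp [pmA_step, pmHdr_nil]
    · rw [PySem.List.index?_cons_of_ne xs hx]
      have hstep : pmA_step (false, ht, [], none) x =
          (false, if ht = none then some (PySem.Str.strip x) else ht, [], none) := by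
        by_cases hh : ht = none <;> simp [pmA_step, hx, hh]
      rw [List.foldl_cons, hstep, ih]
      cases h : PySem.List.index? xs "" with
      | none => simp [pmHdr_cons ht x hx]
      | some i => simp [pmHdr_cons ht x hx, List.drop_succ_cons, List.take_succ_cons]

-- outside the header, empty lines are skipped while no interaction is active
theorem pmA_skip (body : List String) (ht : Option String) (out : List (List String)) :
    body.foldl pmA_step (true, ht, out, none) =
      (body.dropWhile (· = "")).foldl pmA_step (true, ht, out, none) := by
  induction body with
  | nil => rfl
  | cons x xs ih =>
    by_cases hx : x = ""
    · subst hx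
      have h0 : pmA_step (true, ht, out, none) "" = (true, ht, out, none) := by
        simp [pmA_step]
      rw [List.foldl_cons, h0, ih]
      simp
    · simp [hx]

-- the active run: an open interaction absorbs lines up to the first "(End)" inclusive
theorem pmA_run (xs : List String) (g : List String) (ht : Option String)
    (out : List (List String)) :
    xs.foldl pmA_step (true, ht, out, some g) =
      match PySem.List.index? xs "(End)" with
      | some i => (xs.drop (i + 1)).foldl pmA_step
          (true, ht, out ++ [g ++ xs.take (i + 1)], none)
      | none => (true, ht, out, some (g ++ xs)) := by
  induction xs generalizing g with
  | nil => simp [PySem.List.index?]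
  | cons x xs ih =>
    by_cases hx : x = "(End)"
    · subst hx
      rw [PySem.List.index?_cons_self]
      simp [pmA_step]
    · rw [PySem.List.index?_cons_of_ne xs hx]
      have hstep : pmA_step (true, ht, out, some g) x = (true, ht, out, some (g ++ [x])) := by
        simp [pmA_step, hx]
      rw [List.foldl_cons, hstep, ih]
      cases h : PySem.List.index? xs "(End)" with
      | none => simp
      | some i => simp [List.drop_succ_cons, List.take_succ_cons]

-- read A's final state off as the returned pair
def pmFin (st : Bool × Option String × List (List String) × Option (List String)) :
    Option String × List (List String) :=
  (st.2.1, st.2.2.1 ++ (match st.2.2.2 with | some g => [g] | none => []))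

theorem dropWhile_head_ne (p : String → Bool) (l : List String) (x : String) (xs : List String)
    (h : l.dropWhile p = x :: xs) : p x = false := by
  have := List.dropWhile_get_zero_not p l (by simp [h])
  simpa [h] using this

-- A's body phase equals B's recursive segmentation
theorem pmA_body (body : List String) (ht : Option String) (out : List (List String)) :
    pmFin (body.foldl pmA_step (true, ht, out, none)) = (ht, out ++ pmB_groups body) := by
  rw [pmA_skip]
  cases hr : body.dropWhile (· = "") with
  | nil =>
    have hg : pmB_groups body = [] := by rw [pmB_groups_eq]; simp [hr]
    simp [pmFin, hg]
  | cons x xs =>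
    have hx : x ≠ "" := by
      have := dropWhile_head_ne (fun l => decide (l = "")) body x xs hr
      simpa using this
    have hlen : (x :: xs).length ≤ body.length := by
      rw [← hr]; exact List.length_dropWhile_le _ _
    have hopen : pmA_step (true, ht, out, none) x =
        (if x = "(End)" then (true, ht, out ++ [[x]], none) else (true, ht, out, some [x])) := by
      by_cases he : x = "(End)" <;> simp [pmA_step, hx, he]
    rw [List.foldl_cons, hopen]
    by_cases he : x = "(End)"
    · subst he
      rw [if_pos rfl]
      have hxs : xs.length < body.length := by
        simp only [List.length_cons] at hlen; omega
      rw [pmA_body xs ht (out ++ [["(End)"]])]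
      have hg : pmB_groups body = ["(End)"] :: pmB_groups xs := by
        rw [pmB_groups_eq]
        simp only [hr]
        rw [PySem.List.index?_cons_self]
        simp
      simp [hg]
    · rw [if_neg he]
      rw [pmA_run]
      cases h : PySem.List.index? xs "(End)" with
      | some i =>
        have hd : (xs.drop (i + 1)).length < body.length := by
          have : (xs.drop (i + 1)).length ≤ xs.length := by
            rw [List.length_drop]; omega
          simp only [List.length_cons] at hlen; omega
        rw [pmA_body (xs.drop (i + 1)) ht (out ++ [[x] ++ xs.take (i + 1)])]
        have hg : pmB_groups body = (x :: xs.take (i + 1)) :: pmB_groups (xs.drop (i + 1)) := by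
          rw [pmB_groups_eq]
          simp only [hr]
          rw [PySem.List.index?_cons_of_ne xs he, h]
          simp [List.take_succ_cons, List.drop_succ_cons]
        simp [hg]
      | none =>
        have hg : pmB_groups body = [x :: xs] := by
          rw [pmB_groups_eq]
          simp only [hr]
          rw [PySem.List.index?_cons_of_ne xs he, h]
          simp [pmB_groups_nil]
        simp [pmFin, hg]
termination_by body.length
decreasing_by
  · exact hxs
  · exact hd

-- ===== VERDICT (by name: the statement is the Claim_ definition above) =====
theorem parse_multiple_spec : Claim_equal_parse_multiple := by
  intro input_lines _
  unfold Spec_parse_multiple parse_multiple parse_multiple_alt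
  have hmain := pmA_head input_lines none
  cases h : PySem.List.index? input_lines "" with
  | some i =>
    rw [h] at hmain
    show pmFin (input_lines.foldl pmA_step (false, none, [], none)) = _
    rw [hmain, pmA_body]
    simp [pmHdr]
  | none =>
    rw [h] at hmain
    show pmFin (input_lines.foldl pmA_step (false, none, [], none)) = _
    rw [hmain]
    have hdrop : input_lines.drop (input_lines.length + 1) = [] := by
      apply List.drop_eq_nil_of_le; omega
    simp [pmFin, pmHdr, hdrop, pmB_groups_nil]
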